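-- pv_equiv track=rewrite | github.com/dudecon/python | Suno_Time_Summation.py | find_seconds
-- ===== SOURCE A (Python) =====
-- def find_seconds(timestamp_label):
--     total_secs = 0
--     digits = timestamp_label.split(':')
--     i = 0
--     while len(digits) > 0:
--         total_secs += (60**i) * int(digits.pop())
--         i += 1
--     return total_secs
-- ===== SOURCE B (Python) =====
-- def find_seconds(timestamp_label):
--     total_secs = 0
--     for part in timestamp_label.split(':'):
--         total_secs = total_secs * 60 + int(part)
--     return total_secs
-- ===== Notes on version B (the rewrite author's own statement) =====
-- stated objective: idiomatic
-- what changed: Replaces A's right-to-left pop loop with explicit 60**i power accumulation by a left-to-right Horner fold (total = total*60 + int(part)).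
import Mathlib
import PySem

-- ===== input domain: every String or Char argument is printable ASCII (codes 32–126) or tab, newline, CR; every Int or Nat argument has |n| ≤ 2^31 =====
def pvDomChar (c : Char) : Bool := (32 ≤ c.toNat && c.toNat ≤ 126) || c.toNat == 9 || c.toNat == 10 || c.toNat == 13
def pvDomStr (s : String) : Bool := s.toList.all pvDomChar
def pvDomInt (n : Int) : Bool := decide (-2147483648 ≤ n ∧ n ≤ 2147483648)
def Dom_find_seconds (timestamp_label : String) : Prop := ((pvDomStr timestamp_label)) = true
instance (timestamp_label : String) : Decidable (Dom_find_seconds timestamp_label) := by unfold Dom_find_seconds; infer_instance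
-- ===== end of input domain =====

-- B rewrites A's right-to-left pop loop with 60**i powers as a left-to-right Horner fold (same cost, more idiomatic).

-- ===== PORT A =====
-- while len(digits) > 0: total_secs += (60**i) * int(digits.pop()); i += 1
-- (int() raising ValueError is excluded by Pre_; the port reads the parsed value with getD 0 there)
def find_seconds_loop (digits : List String) (i : Nat) (total_secs : Int) : Int :=
  if h : digits = [] then total_secs
  else
    find_seconds_loop digits.dropLast (i + 1)
      (total_secs + 60 ^ i * (PySem.Int.ofStr? (digits.getLast h)).getD 0)
termination_by digits.length
decreasing_by
  have : 0 < digits.length := List.length_pos_iff.mpr h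
  simp only [List.length_dropLast]; omega

def find_seconds (timestamp_label : String) : Int :=
  find_seconds_loop ((PySem.Str.split? timestamp_label ":").getD []) 0 0

-- ===== PORT B =====
def find_seconds_alt (timestamp_label : String) : Int :=
  ((PySem.Str.split? timestamp_label ":").getD []).foldl
    (fun total_secs part => total_secs * 60 + (PySem.Int.ofStr? part).getD 0) 0

-- ===== PRECONDITION & SPEC =====
-- Pre_ excludes exactly the inputs where some ':'-separated component is not an int literal,
-- on which Python's int() (and hence A and B alike) raises ValueError.
def Pre_find_seconds (timestamp_label : String) : Prop :=
  (((PySem.Str.split? timestamp_label ":").getD []).all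
    (fun part => (PySem.Int.ofStr? part).isSome)) = true
instance (timestamp_label : String) : Decidable (Pre_find_seconds timestamp_label) := by
  unfold Pre_find_seconds; infer_instance

def pvWitness_find_seconds : String := "1:02:03"

def Spec_find_seconds (timestamp_label : String) (out : Int) : Prop := out = find_seconds_alt timestamp_label
instance (timestamp_label : String) (out : Int) : Decidable (Spec_find_seconds timestamp_label out) := by unfold Spec_find_seconds; infer_instance

-- ===== CLAIM (what is proved, stated in full; the proofs are below) =====
def Claim_equal_find_seconds : Prop := ∀ (timestamp_label : String), Dom_find_seconds timestamp_label → Pre_find_seconds timestamp_label → Spec_find_seconds timestamp_label (find_seconds timestamp_label)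

-- ===== LEMMAS AND PROOFS =====
lemma find_seconds_loop_snoc (ps : List String) (p : String) (i : Nat) (t : Int) :
    find_seconds_loop (ps ++ [p]) i t
      = find_seconds_loop ps (i + 1) (t + 60 ^ i * (PySem.Int.ofStr? p).getD 0) := by
  rw [find_seconds_loop]
  simp

lemma find_seconds_loop_horner (ps : List String) (i : Nat) (t : Int) :
    find_seconds_loop ps i t
      = t + 60 ^ i *
          ps.foldl (fun total_secs part => total_secs * 60 + (PySem.Int.ofStr? part).getD 0) 0 := by
  induction ps using List.reverseRecOn generalizing i t with
  | nil => rw [find_seconds_loop]; simp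
  | append_singleton ps p ih =>
      rw [find_seconds_loop_snoc, ih, List.foldl_append]
      simp only [List.foldl_cons, List.foldl_nil]
      ring

-- ===== VERDICT (by name: the statement is the Claim_ definition above) =====
theorem find_seconds_spec : Claim_equal_find_seconds := by
  intro s _ _
  unfold Spec_find_seconds find_seconds find_seconds_alt
  rw [find_seconds_loop_horner]
  simp
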